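-- pv_equiv track=rewrite | github.com/A1CST/GENREG_GENOFLOW | GENREG_TIERED_LEARNING/benchmark2.py | categorize_word
-- ===== SOURCE A (Python) =====
-- def categorize_word(word):
--     """Categorize a word by its semantic type."""
--     categories = {
--         "animal": ["cat", "dog", "bird", "fish", "horse", "cow", "pig", "sheep",
--                    "chicken", "duck", "rabbit", "mouse"],
--         "color": ["red", "blue", "green", "yellow", "black", "white", "brown", "orange"],
--         "verb": ["runs", "sits", "eats", "walks", "jumps", "flies", "swims", "grows",
--                  "sees", "hears", "goes", "comes", "takes", "gives", "makes", "puts",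
--                  "opens", "closes", "holds", "drops", "pulls", "pushes", "throws",
--                  "loves", "likes", "wants", "needs", "knows", "thinks", "feels", "says"],
--         "adjective": ["big", "small", "hot", "cold", "tall", "fast", "slow",
--                       "old", "new", "long", "short", "heavy", "soft", "hard",
--                       "happy", "sad", "angry", "scared", "tired", "hungry"],
--         "nature": ["tree", "grass", "sun", "sky", "water", "fire", "rock", "leaf",
--                    "flower", "plant", "forest", "lake", "sea", "beach", "hill"],
--         "body": ["hand", "foot", "head", "eye", "arm", "leg", "nose", "mouth", "ear"],
--         "food": ["bread", "milk", "egg", "meat", "fruit", "apple", "orange", "rice"],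
--         "article": ["the", "a"],
--         "preposition": ["in", "on", "at", "to", "from", "with", "by", "for",
--                         "under", "over", "behind", "near", "between", "into", "out"],
--         "pronoun": ["he", "she", "it", "they", "we", "you", "this", "that"],
--     }
--
--     for category, words in categories.items():
--         if word in words:
--             return category
--     return "other"
-- ===== SOURCE B (Python) =====
-- # Word lists kept as compact whitespace-separated strings; a reverse
-- # word -> category table is built once (first-wins, so "orange" -> "color"),
-- # and the function body is a single dict lookup.
-- _CATEGORY_WORDS = [
--     ("animal", "cat dog bird fish horse cow pig sheep chicken duck rabbit mouse"),
--     ("color", "red blue green yellow black white brown orange"),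
--     ("verb", "runs sits eats walks jumps flies swims grows sees hears goes comes "
--              "takes gives makes puts opens closes holds drops pulls pushes throws "
--              "loves likes wants needs knows thinks feels says"),
--     ("adjective", "big small hot cold tall fast slow old new long short heavy "
--                   "soft hard happy sad angry scared tired hungry"),
--     ("nature", "tree grass sun sky water fire rock leaf flower plant forest "
--                "lake sea beach hill"),
--     ("body", "hand foot head eye arm leg nose mouth ear"),
--     ("food", "bread milk egg meat fruit apple orange rice"),
--     ("article", "the a"),
--     ("preposition", "in on at to from with by for under over behind near "
--                     "between into out"),
--     ("pronoun", "he she it they we you this that"),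
-- ]
--
-- _REVERSE = {}
-- for _cat, _ws in _CATEGORY_WORDS:
--     for _w in _ws.split():
--         _REVERSE.setdefault(_w, _cat)
--
--
-- def categorize_word(word):
--     """Categorize a word by its semantic type."""
--     return _REVERSE.get(word, "other")
-- ===== Notes on version B (the rewrite author's own statement) =====
-- stated objective: simpler
-- what changed: B keeps each category's words as one whitespace-separated string, builds a word-to-category reverse dictionary once by splitting each string (setdefault so the earliest category wins, e.g. 'orange'->'color'), and the function body is a single dict lookup, replacing A's per-call scan over every category's word list.
import Mathlib
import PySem

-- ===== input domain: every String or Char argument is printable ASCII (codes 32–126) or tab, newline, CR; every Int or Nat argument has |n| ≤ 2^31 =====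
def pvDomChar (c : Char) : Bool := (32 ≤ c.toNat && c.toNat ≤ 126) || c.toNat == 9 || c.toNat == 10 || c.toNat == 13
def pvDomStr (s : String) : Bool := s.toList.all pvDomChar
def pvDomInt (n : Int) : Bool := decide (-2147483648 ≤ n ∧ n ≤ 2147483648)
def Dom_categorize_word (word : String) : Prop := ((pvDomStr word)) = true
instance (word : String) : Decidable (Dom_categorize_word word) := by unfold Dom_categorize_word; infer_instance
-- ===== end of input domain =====

-- B stores each category's words as one whitespace-separated string, builds a reverse
-- word→category table once (first-wins setdefault, so "orange"→"color"), and the body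
-- is a single dict lookup (objective: simpler).

-- ===== PORT A =====
-- A's category dict literal, in declaration order
def pvCats : List (String × List String) :=
  [ ("animal", ["cat", "dog", "bird", "fish", "horse", "cow", "pig", "sheep",
                "chicken", "duck", "rabbit", "mouse"]),
    ("color", ["red", "blue", "green", "yellow", "black", "white", "brown", "orange"]),
    ("verb", ["runs", "sits", "eats", "walks", "jumps", "flies", "swims", "grows",
              "sees", "hears", "goes", "comes", "takes", "gives", "makes", "puts",
              "opens", "closes", "holds", "drops", "pulls", "pushes", "throws",
              "loves", "likes", "wants", "needs", "knows", "thinks", "feels", "says"]),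
    ("adjective", ["big", "small", "hot", "cold", "tall", "fast", "slow",
                   "old", "new", "long", "short", "heavy", "soft", "hard",
                   "happy", "sad", "angry", "scared", "tired", "hungry"]),
    ("nature", ["tree", "grass", "sun", "sky", "water", "fire", "rock", "leaf",
                "flower", "plant", "forest", "lake", "sea", "beach", "hill"]),
    ("body", ["hand", "foot", "head", "eye", "arm", "leg", "nose", "mouth", "ear"]),
    ("food", ["bread", "milk", "egg", "meat", "fruit", "apple", "orange", "rice"]),
    ("article", ["the", "a"]),
    ("preposition", ["in", "on", "at", "to", "from", "with", "by", "for",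
                     "under", "over", "behind", "near", "between", "into", "out"]),
    ("pronoun", ["he", "she", "it", "they", "we", "you", "this", "that"]) ]

-- A's loop: for category, words in categories.items(): if word in words: return category
def pvScanA (word : String) : List (String × List String) → String
  | [] => "other"
  | (c, ws) :: rest => if ws.contains word then c else pvScanA word rest

def categorize_word (word : String) : String := pvScanA word pvCats

-- ===== PORT B =====
-- B's data: (category, space-separated word string) pairs
def pvCatsB : List (String × String) :=
  [ ("animal", "cat dog bird fish horse cow pig sheep chicken duck rabbit mouse"),
    ("color", "red blue green yellow black white brown orange"),
    ("verb", "runs sits eats walks jumps flies swims grows sees hears goes comes takes gives makes puts opens closes holds drops pulls pushes throws loves likes wants needs knows thinks feels says"),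
    ("adjective", "big small hot cold tall fast slow old new long short heavy soft hard happy sad angry scared tired hungry"),
    ("nature", "tree grass sun sky water fire rock leaf flower plant forest lake sea beach hill"),
    ("body", "hand foot head eye arm leg nose mouth ear"),
    ("food", "bread milk egg meat fruit apple orange rice"),
    ("article", "the a"),
    ("preposition", "in on at to from with by for under over behind near between into out"),
    ("pronoun", "he she it they we you this that") ]

-- the one-time reverse table: _REVERSE.setdefault(w, cat) over _ws.split() in order
def pvReverse : PySem.Dict String String :=
  pvCatsB.foldl
    (fun d cw => (PySem.Str.split₀ cw.2).foldl (fun d w => d.setdefault w cw.1) d)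
    PySem.Dict.empty

def categorize_word_alt (word : String) : String := pvReverse.getD word "other"

-- ===== PRECONDITION & SPEC =====
def Spec_categorize_word (word : String) (out : String) : Prop := out = categorize_word_alt word
instance (word : String) (out : String) : Decidable (Spec_categorize_word word out) := by unfold Spec_categorize_word; infer_instance

-- ===== CLAIM =====
def Claim_equal_categorize_word : Prop := ∀ (word : String), Dom_categorize_word word → Spec_categorize_word word (categorize_word word)

-- ===== LEMMAS AND PROOFS =====

-- splitting B's compact strings recovers exactly A's word lists
set_option maxRecDepth 10000 in
theorem pv_catsB_split :
    pvCatsB.map (fun cw => (cw.1, PySem.Str.split₀ cw.2)) = pvCats := by decide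

-- inner setdefault loop: earlier bindings in d win; otherwise first hit in ws
theorem pv_inner_get? (ws : List String) (cat w : String) (d : PySem.Dict String String) :
    (ws.foldl (fun d x => d.setdefault x cat) d).get? w =
      ((d.get? w).or (if ws.contains w then some cat else none)) := by
  induction ws generalizing d with
  | nil => cases h : d.get? w <;> simp_all
  | cons x xs ih =>
    simp only [List.foldl_cons, ih, List.contains_cons]
    by_cases hx : w = x
    · subst hx
      rw [PySem.Dict.get?_setdefault_self]
      cases h : d.get? w <;> simp_all
    · rw [PySem.Dict.get?_setdefault_of_ne (hne := hx)]
      cases h : d.get? w <;> simp_all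

-- outer loop: the table lookup equals A's first-category scan, modulo earlier bindings
theorem pv_outer (cats : List (String × List String)) (w : String)
    (d : PySem.Dict String String) :
    (cats.foldl (fun d cw => cw.2.foldl (fun d x => d.setdefault x cw.1) d) d).getD w "other" =
      (match d.get? w with
       | some v => v
       | none => pvScanA w cats) := by
  induction cats generalizing d with
  | nil =>
    simp only [List.foldl_nil, PySem.Dict.getD]
    cases h : d.get? w <;> simp_all [pvScanA]
  | cons cw rest ih =>
    simp only [List.foldl_cons, ih, pv_inner_get?]
    obtain ⟨c, ws⟩ := cw
    cases h : d.get? w with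
    | some v => simp
    | none =>
      by_cases hc : w ∈ ws <;> simp [pvScanA, hc]

-- B's fold over (category, string) pairs is the fold over A's (category, list) pairs
theorem pv_reverse_eq :
    pvReverse = pvCats.foldl
      (fun d cw => cw.2.foldl (fun d x => d.setdefault x cw.1) d) PySem.Dict.empty := by
  rw [← pv_catsB_split, List.foldl_map]
  rfl

-- ===== VERDICT =====
theorem categorize_word_spec : Claim_equal_categorize_word := by
  intro word _
  show categorize_word word = categorize_word_alt word
  have h := pv_outer pvCats word PySem.Dict.empty
  simp only [PySem.Dict.get?_empty] at h
  simpa [categorize_word, categorize_word_alt, pv_reverse_eq] using h.symm
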